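-- pv_equiv track=rewrite | github.com/Yushi-Y/Leetcode | Interviews/Huawei/塔子哥基础/哈希_Hash_map/哈希2.py | query
-- ===== SOURCE A (Python) =====
-- def query(nums, query_tuples):
--     positions = []
--
--     # create an index map of positions: {num1:[1,3,5,7]; num2:[2,4,6]}
--     index_map = {}
--     for i, num in enumerate(nums):
--         if num not in index_map:
--             index_map[num] = []
--         index_map[num].append(i)
--         # index_map[num] = index_map.setdefault(num, []).append(i)
--         # .setdefault() returns the list compared to .get() that returns None, as .append modifies the list in-place and returns None
--
--     for (q, k) in query_tuples:
--         position = -1 # if not find, return -1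
--
--         all_positions = index_map.get(q, [])
--         if k <= len(all_positions):
--             position = all_positions[k - 1]
--
--         positions.append(position)
--
--     return positions
-- ===== SOURCE B (Python) =====
-- def query(nums, query_tuples):
--     def kth(q, k):
--         pos = [i for i, x in enumerate(nums) if x == q]
--         return pos[k - 1] if k <= len(pos) else -1
--     return [kth(q, k) for (q, k) in query_tuples]
-- ===== Notes on version B (the rewrite author's own statement) =====
-- stated objective: alternative
-- what changed: Replaces the global index_map (one pass over nums building per-value position lists in a dict) by a per-query rescan: each query rebuilds its position list with a comprehension over enumerate(nums), keeping the exact k<=len / pos[k-1] guard.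
import Mathlib
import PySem

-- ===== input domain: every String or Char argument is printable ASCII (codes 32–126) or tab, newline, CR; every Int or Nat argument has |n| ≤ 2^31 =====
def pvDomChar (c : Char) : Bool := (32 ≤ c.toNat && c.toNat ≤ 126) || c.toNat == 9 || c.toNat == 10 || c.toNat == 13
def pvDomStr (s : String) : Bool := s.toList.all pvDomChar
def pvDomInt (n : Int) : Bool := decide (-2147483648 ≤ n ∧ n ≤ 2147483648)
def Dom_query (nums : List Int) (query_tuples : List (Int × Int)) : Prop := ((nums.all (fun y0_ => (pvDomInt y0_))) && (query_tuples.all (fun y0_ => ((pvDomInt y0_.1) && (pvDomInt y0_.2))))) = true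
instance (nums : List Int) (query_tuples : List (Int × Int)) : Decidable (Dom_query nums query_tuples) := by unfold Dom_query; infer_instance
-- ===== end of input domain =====

-- B drops A's global index_map: each query rebuilds its own position list by rescanning nums
-- (a different traversal shape, same exact k<=len / pos[k-1] guard). Objective: alternative.

-- ===== PORT A =====
-- step of A's first loop: 'if num not in index_map: index_map[num] = []' then 'index_map[num].append(i)'
def queryStep (d : PySem.Dict Int (List Int)) (p : Int × Int) : PySem.Dict Int (List Int) :=
  let d1 := if d.contains p.2 then d else d.insert p.2 []
  d1.modify p.2 [] (fun l => l ++ [p.1])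

def query (nums : List Int) (query_tuples : List (Int × Int)) : List Int :=
  let index_map := (PySem.List.enumerate nums).foldl queryStep PySem.Dict.empty
  query_tuples.foldl (fun positions qk =>
    let all_positions := index_map.getD qk.1 []
    let position : Int :=
      if qk.2 ≤ (all_positions.length : Int) then
        PySem.List.pyGetD all_positions (qk.2 - 1) (-1)   -- exact under Pre_query (index in range)
      else -1
    positions ++ [position]) []

-- ===== PORT B =====
def query_alt (nums : List Int) (query_tuples : List (Int × Int)) : List Int :=
  query_tuples.map (fun qk =>
    let pos := (PySem.List.enumerate nums).foldl
      (fun l p => if p.2 == qk.1 then l ++ [p.1] else l) []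
    if qk.2 ≤ (pos.length : Int) then
      PySem.List.pyGetD pos (qk.2 - 1) (-1)               -- exact under Pre_query (index in range)
    else -1)

-- ===== PRECONDITION & SPEC =====
-- Pre_ excludes exactly the inputs on which A raises IndexError: a query (q,k) with
-- k ≤ -count(nums,q) passes the 'k <= len' guard yet indexes out of range (e.g. k=0 on a missing value).
def Pre_query (nums : List Int) (query_tuples : List (Int × Int)) : Prop :=
  ∀ p ∈ query_tuples, -((nums.count p.1 : Int)) < p.2
instance (nums : List Int) (query_tuples : List (Int × Int)) : Decidable (Pre_query nums query_tuples) := by unfold Pre_query; infer_instance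

def pvWitness_query : List Int × (List (Int × Int)) := ([1, 2, 1, 3], [(1, 2), (3, 1), (5, 1)])

def Spec_query (nums : List Int) (query_tuples : List (Int × Int)) (out : List Int) : Prop := out = query_alt nums query_tuples
instance (nums : List Int) (query_tuples : List (Int × Int)) (out : List Int) : Decidable (Spec_query nums query_tuples out) := by unfold Spec_query; infer_instance

-- ===== CLAIM (what is proved, stated in full; the proofs are below) =====
def Claim_equal_query : Prop := ∀ (nums : List Int) (query_tuples : List (Int × Int)), Dom_query nums query_tuples → Pre_query nums query_tuples → Spec_query nums query_tuples (query nums query_tuples)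

-- ===== LEMMAS AND PROOFS =====

-- A's dict, read back at any key, is the filtered first components of the enumerate pairs.
theorem getD_foldl_queryStep (ps : List (Int × Int)) (d : PySem.Dict Int (List Int)) (q : Int) :
    (ps.foldl queryStep d).getD q [] = d.getD q [] ++ (ps.filter (fun p => p.2 == q)).map (·.1) := by
  induction ps generalizing d with
  | nil => simp
  | cons p ps ih =>
    simp only [List.foldl_cons, ih, List.filter_cons]
    have hstep : (queryStep d p).getD q [] = d.getD q [] ++ if p.2 == q then [p.1] else [] := by
      unfold queryStep
      by_cases hc : d.contains p.2
      · simp only [hc, if_true, PySem.Dict.getD_modify]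
        by_cases hq : q = p.2
        · simp [hq]
        · have hq' : ¬ p.2 = q := fun h => hq h.symm
          simp [hq, hq']
      · rw [Bool.not_eq_true] at hc
        simp only [hc, Bool.false_eq_true, if_false, PySem.Dict.getD_modify, PySem.Dict.getD_insert]
        by_cases hq : q = p.2
        · simp [hq, PySem.Dict.getD_of_not_contains d [] hc]
        · have hq' : ¬ p.2 = q := fun h => hq h.symm
          simp [hq, hq']
    by_cases hpq : p.2 == q
    · simp [hstep, hpq, List.append_assoc]
    · simp [hstep, hpq]

-- B's per-query scan produces the same position list.
theorem scan_eq_filter (nums : List Int) (q : Int) :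
    (PySem.List.enumerate nums).foldl (fun l p => if p.2 == q then l ++ [p.1] else l) [] =
      ((PySem.List.enumerate nums).filter (fun p => p.2 == q)).map (·.1) := by
  simpa using PySem.List.foldl_append_if (l := PySem.List.enumerate nums)
    (p := fun p => p.2 == q) (f := (·.1)) (acc := [])

theorem query_spec' (nums : List Int) (query_tuples : List (Int × Int)) :
    query nums query_tuples = query_alt nums query_tuples := by
  unfold query query_alt
  rw [PySem.List.foldl_append_singleton_eq_map]
  simp only [List.nil_append]
  refine List.map_congr_left (fun qk _ => ?_)
  rw [getD_foldl_queryStep, PySem.Dict.getD_empty, List.nil_append, scan_eq_filter]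

-- ===== VERDICT (by name: the statement is the Claim_ definition above) =====
theorem query_spec : Claim_equal_query := by
  intro nums query_tuples _ _
  exact query_spec' nums query_tuples
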